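-- pv_equiv track=rewrite | github.com/Lohithgoud/Lohithgoud | python codes/Allocate Minimum Number of Pages.py | allpossible
-- ===== SOURCE A (Python) =====
-- def allpossible(arr,mid):
--   n = len(arr)
--   student = 1
--   pages = 0
--
--   for i in range(n):
--     if pages + arr[i] <= mid:
--       pages += arr[i]
--     else:
--       student += 1
--       pages += arr[i]
--
--   return student
-- ===== SOURCE B (Python) =====
-- def allpossible(arr, mid):
--     # pass 1: explicit table of prefix sums
--     prefix = []
--     total = 0
--     for x in arr:
--         total += x
--         prefix.append(total)
--     # pass 2: count prefix sums strictly greater than mid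
--     return 1 + sum(1 for p in prefix if p > mid)
-- ===== Notes on version B (the rewrite author's own statement) =====
-- stated objective: simpler
-- what changed: Replaced the stateful student/pages loop by a prefix-sum table built in one pass plus a second counting pass (result = 1 + number of prefix sums exceeding mid).
import Mathlib
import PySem

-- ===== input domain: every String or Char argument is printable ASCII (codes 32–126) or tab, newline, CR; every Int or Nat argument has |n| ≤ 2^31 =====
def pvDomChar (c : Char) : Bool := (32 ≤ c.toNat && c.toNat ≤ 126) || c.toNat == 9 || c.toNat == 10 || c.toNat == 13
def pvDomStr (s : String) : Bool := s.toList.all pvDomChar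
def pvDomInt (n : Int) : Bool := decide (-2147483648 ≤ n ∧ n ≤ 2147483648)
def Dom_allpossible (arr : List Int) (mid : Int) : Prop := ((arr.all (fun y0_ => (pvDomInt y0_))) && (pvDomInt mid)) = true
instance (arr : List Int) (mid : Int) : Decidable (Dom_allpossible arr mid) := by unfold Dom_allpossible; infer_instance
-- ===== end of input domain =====

-- B replaces A's stateful student/pages loop by an explicit prefix-sum table plus a counting pass (simpler decomposition).

-- ===== PORT A =====
-- loop over arr with state (student, pages), as in A
def allpossible (arr : List Int) (mid : Int) : Int :=
  (arr.foldl (fun (st : Int × Int) a =>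
      if st.2 + a ≤ mid then (st.1, st.2 + a) else (st.1 + 1, st.2 + a)) (1, 0)).1

-- ===== PORT B =====
-- pass 1: build the prefix-sum table (list accumulator + running total)
def allpossible_alt (arr : List Int) (mid : Int) : Int :=
  let pfx := (arr.foldl (fun (st : List Int × Int) x =>
      let t := st.2 + x
      (st.1 ++ [t], t)) ([], 0)).1
  -- pass 2: count entries strictly greater than mid
  1 + (pfx.countP (fun p => mid < p) : Int)

-- ===== PRECONDITION & SPEC =====
def Spec_allpossible (arr : List Int) (mid : Int) (out : Int) : Prop := out = allpossible_alt arr mid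
instance (arr : List Int) (mid : Int) (out : Int) : Decidable (Spec_allpossible arr mid out) := by unfold Spec_allpossible; infer_instance

-- ===== CLAIM (what is proved, stated in full; the proofs are below) =====
def Claim_equal_allpossible : Prop := ∀ (arr : List Int) (mid : Int), Dom_allpossible arr mid → Spec_allpossible arr mid (allpossible arr mid)

-- ===== LEMMAS AND PROOFS =====

-- the list of prefix sums of l starting from running total pg
def pvPrefixes (pg : Int) : List Int → List Int
  | [] => []
  | x :: l => (pg + x) :: pvPrefixes (pg + x) l

theorem pvFoldA_eq (mid : Int) (l : List Int) : ∀ (st pg : Int),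
    (l.foldl (fun (s : Int × Int) a =>
        if s.2 + a ≤ mid then (s.1, s.2 + a) else (s.1 + 1, s.2 + a)) (st, pg)).1
      = st + ((pvPrefixes pg l).countP (fun p => mid < p) : Int) := by
  induction l with
  | nil => intro st pg; simp [pvPrefixes]
  | cons x l ih =>
    intro st pg
    simp only [List.foldl, pvPrefixes, List.countP_cons]
    by_cases h : pg + x ≤ mid
    · rw [if_pos h, ih]
      simp [show ¬ (mid < pg + x) by omega]
    · rw [if_neg h, ih]
      simp [show mid < pg + x by omega]
      ring

theorem pvFoldB_eq (l : List Int) : ∀ (acc : List Int) (pg : Int),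
    (l.foldl (fun (st : List Int × Int) x =>
        (st.1 ++ [st.2 + x], st.2 + x)) (acc, pg)).1 = acc ++ pvPrefixes pg l := by
  induction l with
  | nil => intro acc pg; simp [pvPrefixes]
  | cons x l ih =>
    intro acc pg
    simp only [List.foldl, pvPrefixes]
    rw [ih]
    simp

-- ===== VERDICT (by name: the statement is the Claim_ definition above) =====
theorem allpossible_spec : Claim_equal_allpossible := by
  intro arr mid _
  show allpossible arr mid = allpossible_alt arr mid
  unfold allpossible allpossible_alt
  rw [pvFoldA_eq, pvFoldB_eq]
  simp
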